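-- pv_equiv track=rewrite | github.com/tox-dev/tox-ini-fmt | src/tox_ini_fmt/formatter/test_env.py | to_commands
-- ===== SOURCE A (Python) =====
-- def fmt_list(values: list[str], substitute: list[str]) -> str:
--     return "\n".join([""] + sorted(substitute) + values)
--
-- _CMD_SEP = "\\"
--
-- def to_commands(value: str) -> str:
--     result: list[str] = []
--     ends_with_sep = False
--     for val in value.splitlines():
--         val = val.strip()
--         cur_ends_with_sep = val.endswith(_CMD_SEP)
--         if cur_ends_with_sep:
--             val = val[:-1].strip()
--         if val and val != _CMD_SEP:
--             ending = f" {_CMD_SEP}" if cur_ends_with_sep else ""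
--             prepend = "  " if ends_with_sep else ""
--             result.append(f"{prepend}{val}{ending}")
--             ends_with_sep = cur_ends_with_sep
--     return fmt_list(result, [])
-- ===== SOURCE B (Python) =====
-- _CMD_SEP = "\\"
--
--
-- def to_commands(value: str) -> str:
--     # Pass 1: parse each line into (text, continues) pairs, dropping blanks.
--     parsed = []
--     for raw in value.splitlines():
--         line = raw.strip()
--         cont = line.endswith(_CMD_SEP)
--         if cont:
--             line = line[:-1].strip()
--         if line and line != _CMD_SEP:
--             parsed.append((line, cont))
--     # Pass 2: split parsed entries into continuation groups (a group ends
--     # at the first entry whose flag is False; a trailing open group may remain).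
--     groups = []
--     cur = []
--     for text, cont in parsed:
--         cur.append(text)
--         if not cont:
--             groups.append(cur)
--             cur = []
--     # Pass 3: each closed group becomes one command joined across lines; an
--     # open trailing group keeps its dangling continuation marker.
--     out = [" \\\n  ".join(g) for g in groups]
--     if cur:
--         out.append(" \\\n  ".join(cur) + " \\")
--     return "\n".join([""] + out)
-- ===== Notes on version B (the rewrite author's own statement) =====
-- stated objective: alternative
-- what changed: Instead of A's single loop that formats each line on the fly while threading an ends_with_sep flag, B parses lines to (text, continues) pairs, splits them into continuation groups, and renders each whole group at once by joining its texts with the multi-line separator ' \\ '.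
import Mathlib
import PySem

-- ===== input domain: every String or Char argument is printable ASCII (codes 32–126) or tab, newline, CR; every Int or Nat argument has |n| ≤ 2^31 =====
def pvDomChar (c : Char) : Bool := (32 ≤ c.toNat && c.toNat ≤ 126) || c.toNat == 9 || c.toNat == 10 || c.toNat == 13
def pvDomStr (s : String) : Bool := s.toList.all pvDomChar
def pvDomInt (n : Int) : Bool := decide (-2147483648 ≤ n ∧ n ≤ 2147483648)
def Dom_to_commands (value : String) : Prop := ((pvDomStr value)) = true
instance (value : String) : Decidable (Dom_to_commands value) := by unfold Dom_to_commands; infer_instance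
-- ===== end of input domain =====

-- B replaces A's per-line loop threading an ends_with_sep flag by a grouping algorithm:
-- parse lines, split them into continuation groups, and join each whole group with the
-- multi-line separator " \\\n  " (objective: alternative).

-- ===== PORT A =====
def fmt_list (values : List String) (substitute : List String) : String :=
  PySem.Str.join "\n" ([""] ++ PySem.List.sorted substitute (fun x => x) false ++ values)

/-- The body of A's `for` loop: state = (result, ends_with_sep). -/
def stepA (st : List String × Bool) (val0 : String) : List String × Bool :=
  let val := PySem.Str.strip val0
  let cur_ends_with_sep := PySem.Str.endswith val "\\"
  let val := if cur_ends_with_sep then PySem.Str.strip (PySem.Str.slice val none (some (-1))) else val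
  if val ≠ "" ∧ val ≠ "\\" then
    (st.1 ++ [(if st.2 then "  " else "") ++ val ++ (if cur_ends_with_sep then " \\" else "")],
     cur_ends_with_sep)
  else st

def to_commands (value : String) : String :=
  let res := (PySem.Str.splitlines value).foldl stepA ([], false)
  fmt_list res.1 []

-- ===== PORT B =====
/-- B's pass 1 loop body: parse one raw line, appending a (text, continues) pair or nothing. -/
def parseStep (acc : List (String × Bool)) (raw : String) : List (String × Bool) :=
  let line := PySem.Str.strip raw
  let cont := PySem.Str.endswith line "\\"
  let line := if cont then PySem.Str.strip (PySem.Str.slice line none (some (-1))) else line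
  if line ≠ "" ∧ line ≠ "\\" then acc ++ [(line, cont)] else acc

/-- B's pass 2 loop body: state = (closed groups, current open group). -/
def groupStep (st : List (List String) × List String) (tc : String × Bool) :
    List (List String) × List String :=
  let cur := st.2 ++ [tc.1]
  if tc.2 then (st.1, cur) else (st.1 ++ [cur], [])

def to_commands_alt (value : String) : String :=
  let parsed := (PySem.Str.splitlines value).foldl parseStep []
  let gc := parsed.foldl groupStep ([], [])
  let out := gc.1.map (fun g => PySem.Str.join " \\\n  " g)
  let out := if gc.2 ≠ [] then out ++ [PySem.Str.join " \\\n  " gc.2 ++ " \\"] else out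
  PySem.Str.join "\n" ("" :: out)

-- ===== PRECONDITION & SPEC =====
def Spec_to_commands (value : String) (out : String) : Prop := out = to_commands_alt value
instance (value : String) (out : String) : Decidable (Spec_to_commands value out) := by
  unfold Spec_to_commands; infer_instance

-- ===== CLAIM =====
def Claim_equal_to_commands : Prop :=
  ∀ (value : String), Dom_to_commands value → Spec_to_commands value (to_commands value)

-- ===== LEMMAS AND PROOFS =====

/-- The shared line parser, as a function. -/
def parseLine (line0 : String) : Option (String × Bool) :=
  let line := PySem.Str.strip line0
  let cont := PySem.Str.endswith line "\\"
  let line := if cont then PySem.Str.strip (PySem.Str.slice line none (some (-1))) else line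
  if line ≠ "" ∧ line ≠ "\\" then some (line, cont) else none

/-- A's formatted output lines, rendered structurally with the previous flag. -/
def render (prev : Bool) : List (String × Bool) → List String
  | [] => []
  | (t, c) :: rest =>
      ((if prev then "  " else "") ++ t ++ (if c then " \\" else "")) :: render c rest

/-- B's grouping, recursively: (closed groups, open trailing group). -/
def grp (cur : List String) : List (String × Bool) → List (List String) × List String
  | [] => ([], cur)
  | tc :: rest =>
      if tc.2 then grp (cur ++ [tc.1]) rest
      else ((cur ++ [tc.1]) :: (grp [] rest).1, (grp [] rest).2)

/-- The joined text (as characters) both programs produce after the leading newline. -/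
def emitC : List (String × Bool) → List Char
  | [] => []
  | (t, c) :: rest =>
      t.toList ++ (if c then [' ', '\\'] else []) ++
      (match rest with
       | [] => []
       | _ :: _ => '\n' :: ((if c then [' ', ' '] else []) ++ emitC rest))

/-- Characters of one joined group. -/
def jgC (g : List String) : List Char :=
  PySem.Chars.join [' ', '\\', '\n', ' ', ' '] (g.map String.toList)

/-- B's output lines (as character lists) from grouping state. -/
def linesB (cur : List String) (parsed : List (String × Bool)) : List (List Char) :=
  (grp cur parsed).1.map jgC ++
    (if (grp cur parsed).2 ≠ [] then [jgC (grp cur parsed).2 ++ [' ', '\\']] else [])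

lemma stepA_eq (st : List String × Bool) (l : String) :
    stepA st l
    = match parseLine l with
      | none => st
      | some (t, c) => (st.1 ++ [(if st.2 then "  " else "") ++ t ++ (if c then " \\" else "")], c) := by
  unfold stepA parseLine
  set val := PySem.Str.strip l with hv
  set cur := PySem.Str.endswith val "\\" with hc
  set val2 := if cur then PySem.Str.strip (PySem.Str.slice val none (some (-1))) else val with hv2
  by_cases h : val2 ≠ "" ∧ val2 ≠ "\\"
  · rw [if_pos h, if_pos h]
  · rw [if_neg h, if_neg h]

lemma foldA_render (ls : List String) (acc : List String) (flag : Bool) :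
    ls.foldl stepA (acc, flag)
    = (acc ++ render flag (ls.filterMap parseLine),
       ((ls.filterMap parseLine).map Prod.snd).getLastD flag) := by
  induction ls generalizing acc flag with
  | nil => simp [render]
  | cons l ls ih =>
      rw [List.foldl_cons, stepA_eq]
      cases h : parseLine l with
      | none => simp [h, ih]
      | some tc =>
          obtain ⟨t, c⟩ := tc
          simp only [ih, List.filterMap_cons, h, render, List.map_cons, List.getLastD_cons,
            List.append_assoc, List.singleton_append]

lemma parseStep_eq (acc : List (String × Bool)) (l : String) :
    parseStep acc l
    = acc ++ (match parseLine l with | none => [] | some p => [p]) := by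
  unfold parseStep parseLine
  set val := PySem.Str.strip l with hv
  set cur := PySem.Str.endswith val "\\" with hc
  set val2 := if cur then PySem.Str.strip (PySem.Str.slice val none (some (-1))) else val with hv2
  by_cases h : val2 ≠ "" ∧ val2 ≠ "\\"
  · rw [if_pos h, if_pos h]
  · rw [if_neg h, if_neg h]; simp

lemma foldl_parseStep (ls : List String) (acc : List (String × Bool)) :
    ls.foldl parseStep acc = acc ++ ls.filterMap parseLine := by
  induction ls generalizing acc with
  | nil => simp
  | cons l ls ih =>
      rw [List.foldl_cons, parseStep_eq]
      cases h : parseLine l with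
      | none => simp [h, ih]
      | some p => simp [h, ih]

lemma grp_fold (parsed : List (String × Bool)) (gs0 : List (List String)) (cur0 : List String) :
    parsed.foldl groupStep (gs0, cur0)
    = (gs0 ++ (grp cur0 parsed).1, (grp cur0 parsed).2) := by
  induction parsed generalizing gs0 cur0 with
  | nil => simp [grp]
  | cons tc rest ih =>
      obtain ⟨t, c⟩ := tc
      cases c with
      | true => simp [groupStep, grp, ih]
      | false => simp [groupStep, grp, ih]

lemma render_eq_nil (prev : Bool) (l : List (String × Bool)) :
    render prev l = [] ↔ l = [] := by
  cases l with
  | nil => simp [render]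
  | cons tc rest => obtain ⟨t, c⟩ := tc; simp [render]

lemma join_cons_ne (sep : List Char) (a : List Char) (l : List (List Char)) (h : l ≠ []) :
    PySem.Chars.join sep (a :: l) = a ++ sep ++ PySem.Chars.join sep l := by
  obtain ⟨b, l, rfl⟩ := List.exists_cons_of_ne_nil h
  exact PySem.Chars.join_cons_cons ..

/-- A's joined lines, characterised. -/
lemma renderA_join (parsed : List (String × Bool)) (prev : Bool) :
    PySem.Chars.join ['\n'] ((render prev parsed).map String.toList)
    = if parsed = [] then [] else (if prev then [' ', ' '] else []) ++ emitC parsed := by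
  induction parsed generalizing prev with
  | nil => simp [render, PySem.Chars.join, List.intercalate]
  | cons tc rest ih =>
      obtain ⟨t, c⟩ := tc
      cases rest with
      | nil =>
          simp only [render, List.map_cons, List.map_nil, PySem.Chars.join_singleton, emitC]
          cases prev <;> cases c <;> simp
      | cons tc' rest' =>
          have hne : (render c (tc' :: rest')).map String.toList ≠ [] := by
            simp [render_eq_nil]
          rw [render, List.map_cons, join_cons_ne _ _ _ hne, ih]
          simp only [emitC]
          cases prev <;> cases c <;> simp

lemma jgC_cons (a : String) (cur : List String) (h : cur ≠ []) :
    jgC (a :: cur) = a.toList ++ [' ', '\\', '\n', ' ', ' '] ++ jgC cur := by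
  obtain ⟨b, cur, rfl⟩ := List.exists_cons_of_ne_nil h
  simp [jgC, PySem.Chars.join_cons_cons]

lemma jgC_append (cur : List String) (t : String) :
    jgC (cur ++ [t])
    = if cur = [] then t.toList else jgC cur ++ [' ', '\\', '\n', ' ', ' '] ++ t.toList := by
  induction cur with
  | nil => simp [jgC, PySem.Chars.join_singleton]
  | cons a cur ih =>
      have h0 : jgC ((a :: cur) ++ [t]) = jgC (a :: (cur ++ [t])) := by simp
      rw [h0, jgC_cons a _ (by simp), ih]
      cases cur with
      | nil => simp [jgC, PySem.Chars.join_singleton]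
      | cons b cur' =>
          rw [jgC_cons a _ (by simp)]
          simp [List.append_assoc]

lemma linesB_ne (cur : List String) (parsed : List (String × Bool))
    (h : cur ≠ [] ∨ parsed ≠ []) : linesB cur parsed ≠ [] := by
  induction parsed generalizing cur with
  | nil =>
      rcases h with h | h
      · simp [linesB, grp, h]
      · exact absurd rfl h
  | cons tc rest ih =>
      obtain ⟨t, c⟩ := tc
      cases c with
      | true =>
          have := ih (cur ++ [t]) (Or.inl (by simp))
          simpa [linesB, grp] using this
      | false => simp [linesB, grp]

/-- B's joined lines, characterised. -/
lemma linesB_join (parsed : List (String × Bool)) (cur : List String) :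
    PySem.Chars.join ['\n'] (linesB cur parsed)
    = if cur = [] then emitC parsed
      else jgC cur ++ [' ', '\\'] ++
        (if parsed = [] then [] else '\n' :: ' ' :: ' ' :: emitC parsed) := by
  induction parsed generalizing cur with
  | nil =>
      cases cur with
      | nil => simp [linesB, grp, emitC, PySem.Chars.join, List.intercalate]
      | cons a cur' => simp [linesB, grp, PySem.Chars.join_singleton]
  | cons tc rest ih =>
      obtain ⟨t, c⟩ := tc
      cases c with
      | true =>
          have hB : linesB cur ((t, true) :: rest) = linesB (cur ++ [t]) rest := by
            simp [linesB, grp]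
          rw [hB, ih (cur ++ [t]), if_neg (by simp), jgC_append]
          cases cur <;> cases rest <;>
            simp [emitC, List.append_assoc]
      | false =>
          have hB : linesB cur ((t, false) :: rest) = jgC (cur ++ [t]) :: linesB [] rest := by
            simp [linesB, grp]
          rw [hB]
          have ihe : PySem.Chars.join ['\n'] (linesB [] rest) = emitC rest := by
            simpa using ih []
          cases hr : rest with
          | nil =>
              rw [show linesB [] ([] : List (String × Bool)) = [] from by simp [linesB, grp]]
              rw [PySem.Chars.join_singleton, jgC_append]
              cases cur <;> simp [emitC, List.append_assoc]
          | cons tc' rest' =>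
              rw [hr] at ihe
              have hne : linesB [] (tc' :: rest') ≠ [] := linesB_ne _ _ (Or.inr (by simp))
              rw [join_cons_ne _ _ _ hne, ihe, jgC_append]
              cases cur <;> simp [emitC, List.append_assoc]

-- ===== VERDICT =====
theorem to_commands_spec : Claim_equal_to_commands := by
  intro value _
  show to_commands value = to_commands_alt value
  apply String.toList_injective
  unfold to_commands to_commands_alt fmt_list
  simp only [foldA_render, foldl_parseStep, grp_fold, List.nil_append, List.append_nil,
    PySem.List.sorted, List.foldl_nil]
  set parsed := (PySem.Str.splitlines value).filterMap parseLine with hp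
  have hBlines : (List.map String.toList (if (grp [] parsed).2 ≠ [] then
        ((grp [] parsed).1.map (fun g => PySem.Str.join " \\\n  " g)) ++
          [PySem.Str.join " \\\n  " (grp [] parsed).2 ++ " \\"]
      else (grp [] parsed).1.map (fun g => PySem.Str.join " \\\n  " g)))
      = linesB [] parsed := by
    unfold linesB
    by_cases h : (grp [] parsed).2 ≠ [] <;>
      simp [h, Function.comp_def, jgC]
  have hA : (PySem.Str.join "\n" ([""] ++ render false parsed)).toList
      = PySem.Chars.join ['\n'] ([] :: (render false parsed).map String.toList) := by
    simp [PySem.Str.join]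
  have hB : (PySem.Str.join "\n" ("" :: (if (grp [] parsed).2 ≠ [] then
        ((grp [] parsed).1.map (fun g => PySem.Str.join " \\\n  " g)) ++
          [PySem.Str.join " \\\n  " (grp [] parsed).2 ++ " \\"]
      else (grp [] parsed).1.map (fun g => PySem.Str.join " \\\n  " g)))).toList
      = PySem.Chars.join ['\n'] ([] :: linesB [] parsed) := by
    rw [← hBlines]; simp [PySem.Str.join]
  rw [hA, hB]
  by_cases hnil : parsed = []
  · rw [hnil]
    simp [render, linesB, grp, PySem.Chars.join_singleton]
  · have h1 : (render false parsed).map String.toList ≠ [] := by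
      simp [render_eq_nil, hnil]
    have h2 : linesB [] parsed ≠ [] := linesB_ne _ _ (Or.inr hnil)
    rw [join_cons_ne _ _ _ h1, join_cons_ne _ _ _ h2, renderA_join, linesB_join,
      if_neg hnil, if_pos rfl]
    simp
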